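-- pv_equiv track=rewrite | github.com/zkily/arai_emaps | backend/app/modules/database/api.py | _find_plating_step_index
-- ===== SOURCE A (Python) =====
-- from typing import Optional
--
-- def _find_plating_step_index(sequence: list) -> Optional[int]:
--     """工程順序内で社内メッキ(plating)または外注メッキ(outsourced_plating)の位置（0-based）。無ければ None。"""
--     if not sequence:
--         return None
--     for k in ("plating", "outsourced_plating"):
--         try:
--             return sequence.index(k)
--         except ValueError:
--             continue
--     return None
-- ===== SOURCE B (Python) =====
-- from typing import Optional
--
-- def _find_plating_step_index(sequence: list) -> Optional[int]:
--     """Single pass recording the first index of each key; 'plating' wins by priority."""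
--     plating = None
--     outsourced = None
--     for i, step in enumerate(sequence):
--         if plating is None and step == "plating":
--             plating = i
--         if outsourced is None and step == "outsourced_plating":
--             outsourced = i
--     return plating if plating is not None else outsourced
-- ===== Notes on version B (the rewrite author's own statement) =====
-- stated objective: alternative
-- what changed: Replaces the two ordered list.index scans (with try/except) by one enumerate pass that records the first index of each key and then selects by key priority.
import Mathlib
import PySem

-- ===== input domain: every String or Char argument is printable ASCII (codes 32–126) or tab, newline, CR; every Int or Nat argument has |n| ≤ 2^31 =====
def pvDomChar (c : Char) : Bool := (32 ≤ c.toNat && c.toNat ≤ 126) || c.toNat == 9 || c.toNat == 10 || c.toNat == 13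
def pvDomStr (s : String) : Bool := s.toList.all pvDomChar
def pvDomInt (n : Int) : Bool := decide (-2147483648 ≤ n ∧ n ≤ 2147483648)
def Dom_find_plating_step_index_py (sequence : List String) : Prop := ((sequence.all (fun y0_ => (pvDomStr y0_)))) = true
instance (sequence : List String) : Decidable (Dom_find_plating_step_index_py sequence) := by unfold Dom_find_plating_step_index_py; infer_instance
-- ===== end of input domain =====

-- ===== PORT A =====
-- A: early-return None on empty, then try sequence.index(k) for each key in order.
def find_plating_step_index_py (sequence : List String) : Option Int :=
  if sequence = [] then none
  else
    match PySem.List.index? sequence "plating" with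
    | some i => some (i : Int)
    | none =>
      match PySem.List.index? sequence "outsourced_plating" with
      | some i => some (i : Int)
      | none => none

-- ===== PORT B =====
-- B: one enumerate pass recording the first index of each key, then select by priority.
def find_plating_step_index_py_alt (sequence : List String) : Option Int :=
  let st := (PySem.List.enumerate sequence 0).foldl
    (fun (acc : Option Int × Option Int) (p : Int × String) =>
      ( if acc.1 = none ∧ p.2 = "plating" then some p.1 else acc.1,
        if acc.2 = none ∧ p.2 = "outsourced_plating" then some p.1 else acc.2 ))
    (none, none)
  match st.1 with
  | some i => some i
  | none => st.2

-- ===== PRECONDITION & SPEC =====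
def Spec_find_plating_step_index_py (sequence : List String) (out : Option Int) : Prop := out = find_plating_step_index_py_alt sequence
instance (sequence : List String) (out : Option Int) : Decidable (Spec_find_plating_step_index_py sequence out) := by unfold Spec_find_plating_step_index_py; infer_instance

-- ===== CLAIM (what is proved, stated in full; the proofs are below) =====
def Claim_equal_find_plating_step_index_py : Prop := ∀ (sequence : List String), Dom_find_plating_step_index_py sequence → Spec_find_plating_step_index_py sequence (find_plating_step_index_py sequence)

-- ===== LEMMAS AND PROOFS =====
def pvPick (a0 : Option Int) (xs : List String) (v : String) (s : Int) : Option Int :=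
  match a0 with
  | some i => some i
  | none => (PySem.List.index? xs v).map (fun k => s + (k : Int))

theorem pvPick_step (p0 : Option Int) (x : String) (xs : List String) (v : String) (s : Int) :
    pvPick (if p0 = none ∧ x = v then some s else p0) xs v (s + 1)
      = pvPick p0 (x :: xs) v s := by
  cases p0 with
  | some i => simp [pvPick]
  | none =>
    by_cases h : x = v
    · subst h
      rw [pvPick.eq_def, pvPick.eq_def, PySem.List.index?_cons_self]
      simp
    · rw [pvPick.eq_def, pvPick.eq_def, PySem.List.index?_cons_of_ne (h := h)]
      simp only [h, and_false, if_false]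
      cases PySem.List.index? xs v <;> simp; ring

theorem pvFold_eq (xs : List String) (s : Int) (p0 o0 : Option Int) :
    (PySem.List.enumerate xs s).foldl
      (fun (acc : Option Int × Option Int) (p : Int × String) =>
        ( if acc.1 = none ∧ p.2 = "plating" then some p.1 else acc.1,
          if acc.2 = none ∧ p.2 = "outsourced_plating" then some p.1 else acc.2 ))
      (p0, o0)
    = (pvPick p0 xs "plating" s, pvPick o0 xs "outsourced_plating" s) := by
  induction xs generalizing s p0 o0 with
  | nil => cases p0 <;> cases o0 <;> simp [PySem.List.enumerate_nil, pvPick]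
  | cons x xs ih =>
    rw [PySem.List.enumerate_cons, List.foldl_cons, ih, pvPick_step, pvPick_step]

-- ===== VERDICT (by name: the statement is the Claim_ definition above) =====
theorem find_plating_step_index_py_spec : Claim_equal_find_plating_step_index_py := by
  intro sequence _
  unfold Spec_find_plating_step_index_py find_plating_step_index_py find_plating_step_index_py_alt
  rw [pvFold_eq]
  cases hs : sequence with
  | nil => simp [pvPick, PySem.List.index?]
  | cons x xs =>
    simp only [pvPick, reduceCtorEq, if_false]
    cases PySem.List.index? (x :: xs) "plating" <;>
      cases PySem.List.index? (x :: xs) "outsourced_plating" <;> simp
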